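-- pv_equiv track=rewrite | github.com/distdl/distdl | src/distdl/utilities/slicing.py | filtered_range_index
-- ===== SOURCE A (Python) =====
-- def range_index(shape):
--     r"""An iterator over Cartesian indices of a given shape.
--
--     Yields all possible Cartesian indices for a Partition of shape `shape` in
--     row-major order: the first index varies slowest and the last index varies
--     fastest.  For example, if the shape is (2, 3), the iterator will yield
--     `[(0, 0), (0, 1), (0, 2), (1, 0), (1, 1), (1, 2)]`.
--
--     Parameters
--     ----------
--     shape : iterable
--         Shape of partition.
--
--     Yields
--     ------
--     A Cartesian index.
--
--     """
--
--     import itertools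
--
--     # An iterator that generates all cartesian coordinates over a set of
--     # dimensions
--     for x in itertools.product(*[range(y) for y in shape]):
--         yield x
--
-- def filtered_range_index(shape, filter):
--     r"""A filtered iterator over Cartesian indices of a given shape.
--
--     Yields all possible Cartesian indices for a Partition of shape `shape`
--     that match a given filter.  The filter is a set of integers that must
--     match.  If a dimension is not required to match, the filter is `None` in
--     that dimension.  For example, if the shape is (2, 3), and the filter is
--     `(1, None)`, then the iterator will yield `[(1, 0), (1, 1), (1, 2)]`.
--
--     Parameters
--     ----------
--     shape : iterable
--         Shape of partition.
--     filter : iterable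
--         Filter mask containing values to match (or None).
--
--     Yields
--     ------
--     A Cartesian index.
--
--     """
--
--     def _filter(idx, filter):
--         for i, f in zip(idx, filter):
--             if f is None:
--                 continue
--             if i != f:
--                 return False
--         return True
--     for idx_tuple in range_index(shape):
--         if _filter(idx_tuple, filter):
--             yield idx_tuple
-- ===== SOURCE B (Python) =====
-- import itertools
--
--
-- def filtered_range_index(shape, filter):
--     # Pin filtered dims to a single candidate (empty if out of range);
--     # only free dims contribute a full range.
--     axes = []
--     for i, n in enumerate(shape):
--         f = filter[i] if i < len(filter) else None
--         if f is None:
--             axes.append(range(n))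
--         else:
--             axes.append([f] if 0 <= f < n else [])
--     yield from itertools.product(*axes)
-- ===== Notes on version B (the rewrite author's own statement) =====
-- stated objective: alternative
-- what changed: Instead of enumerating the full Cartesian product of shape and filtering each index tuple, B builds per-dimension candidate lists (the full range for free dims, a single pinned value -- or nothing when out of range -- for filtered dims) and takes their product, so no rejected tuple is ever generated; it trades the filter pass for axis construction.
import Mathlib
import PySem

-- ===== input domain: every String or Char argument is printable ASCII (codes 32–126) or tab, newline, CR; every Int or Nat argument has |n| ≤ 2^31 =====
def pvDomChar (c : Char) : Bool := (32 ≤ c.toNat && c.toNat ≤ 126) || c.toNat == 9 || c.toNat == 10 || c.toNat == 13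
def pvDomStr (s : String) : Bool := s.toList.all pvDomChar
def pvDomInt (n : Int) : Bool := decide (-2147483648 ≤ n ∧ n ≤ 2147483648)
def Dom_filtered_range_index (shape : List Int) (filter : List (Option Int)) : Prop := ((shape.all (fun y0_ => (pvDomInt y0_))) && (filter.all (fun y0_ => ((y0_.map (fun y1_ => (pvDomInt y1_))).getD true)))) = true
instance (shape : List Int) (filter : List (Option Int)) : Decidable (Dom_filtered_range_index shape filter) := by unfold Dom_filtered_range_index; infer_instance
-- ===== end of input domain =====

-- B builds per-dimension candidate lists (full range / pinned value) and takes their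
-- product instead of filtering the full Cartesian product of shape.

-- itertools.product over a list of axes (row-major, first axis varies slowest);
-- shared transliteration of itertools.product, used by both ports
def pvProduct : List (List Int) → List (List Int)
  | [] => [[]]
  | l :: ls => l.flatMap (fun x => (pvProduct ls).map (fun rest => x :: rest))

-- ===== PORT A =====
-- range_index(shape): product of range(y) for y in shape
def range_index_port (shape : List Int) : List (List Int) :=
  pvProduct (shape.map (fun y => PySem.List.pyRange 0 y 1))

-- the inner _filter loop: zip(idx, filter), skip None, reject on mismatch
def pvFilterLoop : List (Int × Option Int) → Bool
  | [] => true
  | (_, none) :: rest => pvFilterLoop rest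
  | (i, some f) :: rest => if i ≠ f then false else pvFilterLoop rest

def filtered_range_index (shape : List Int) (filter : List (Option Int)) : List (List Int) :=
  (range_index_port shape).filter (fun idx => pvFilterLoop (idx.zip filter))

-- ===== PORT B =====
-- candidate list for one dimension: full range if unfiltered, else the pinned value (guarded)
def pvAxis (n : Int) (f : Option Int) : List Int :=
  match f with
  | none => PySem.List.pyRange 0 n 1
  | some v => if 0 ≤ v ∧ v < n then [v] else []

-- the enumerate loop of Source B: filter[i] if i < len(filter) else None
def pvAxes : List Int → List (Option Int) → List (List Int)
  | [], _ => []
  | n :: ns, [] => PySem.List.pyRange 0 n 1 :: pvAxes ns []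
  | n :: ns, f :: fs => pvAxis n f :: pvAxes ns fs

def filtered_range_index_alt (shape : List Int) (filter : List (Option Int)) : List (List Int) :=
  pvProduct (pvAxes shape filter)

-- ===== PRECONDITION & SPEC =====
def Spec_filtered_range_index (shape : List Int) (filter : List (Option Int)) (out : List (List Int)) : Prop := out = filtered_range_index_alt shape filter
instance (shape : List Int) (filter : List (Option Int)) (out : List (List Int)) : Decidable (Spec_filtered_range_index shape filter out) := by unfold Spec_filtered_range_index; infer_instance

-- ===== CLAIM (what is proved, stated in full; the proofs are below) =====
def Claim_equal_filtered_range_index : Prop := ∀ (shape : List Int) (filter : List (Option Int)), Dom_filtered_range_index shape filter → Spec_filtered_range_index shape filter (filtered_range_index shape filter)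

-- ===== LEMMAS AND PROOFS =====

-- with an empty filter the loop accepts everything
lemma pvFilterLoop_zip_nil (idx : List Int) : pvFilterLoop (idx.zip []) = true := by
  cases idx <;> rfl

lemma pvFilterLoop_cons_none (i : Int) (l : List (Int × Option Int)) :
    pvFilterLoop ((i, none) :: l) = pvFilterLoop l := rfl

lemma pvFilterLoop_cons_some (i f : Int) (l : List (Int × Option Int)) :
    pvFilterLoop ((i, some f) :: l) = if i ≠ f then false else pvFilterLoop l := rfl

-- flatMap of a function that is empty except possibly at v, over a Nodup list
lemma flatMap_single {l : List Int} (hnd : l.Nodup) (v : Int) (h : Int → List (List Int))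
    (hz : ∀ x ∈ l, x ≠ v → h x = []) :
    l.flatMap h = if v ∈ l then h v else [] := by
  induction l with
  | nil => simp
  | cons a as ih =>
    simp only [List.flatMap_cons, List.nodup_cons] at *
    by_cases hav : a = v
    · subst hav
      have : as.flatMap h = [] := by
        apply List.flatMap_eq_nil_iff.mpr
        intro x hx
        exact hz x (List.mem_cons_of_mem _ hx) (fun e => hnd.1 (e ▸ hx))
      simp [this, hnd.1]
    · rw [hz a (List.mem_cons_self) hav, ih hnd.2
        (fun x hx => hz x (List.mem_cons_of_mem _ hx))]
      simp [List.mem_cons, Ne.symm hav]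

-- main equivalence, by induction on shape generalizing filter
lemma pv_main (shape : List Int) (filter : List (Option Int)) :
    (pvProduct (shape.map (fun y => PySem.List.pyRange 0 y 1))).filter
      (fun idx => pvFilterLoop (idx.zip filter)) = pvProduct (pvAxes shape filter) := by
  induction shape generalizing filter with
  | nil =>
    cases filter <;> simp [pvProduct, pvAxes, pvFilterLoop]
  | cons n ns ih =>
    simp only [List.map_cons, pvProduct, List.filter_flatMap]
    cases filter with
    | nil =>
      simp only [pvAxes, pvProduct]
      congr 1
      funext x
      rw [List.filter_map]
      have : (fun idx => pvFilterLoop (idx.zip [])) ∘ (fun rest => x :: rest)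
          = fun _ => true := by
        funext rest
        simp only [Function.comp_apply]
        exact pvFilterLoop_zip_nil _
      rw [this, List.filter_true]
      have := ih ([] : List (Option Int))
      rw [List.filter_eq_self.mpr (by intro a _; exact pvFilterLoop_zip_nil a)] at this
      rw [this]
    | cons f fs =>
      cases f with
      | none =>
        simp only [pvAxes, pvAxis, pvProduct]
        congr 1
        funext x
        rw [List.filter_map]
        have : (fun idx => pvFilterLoop (idx.zip (none :: fs))) ∘ (fun rest => x :: rest)
            = fun rest => pvFilterLoop (rest.zip fs) := by
          funext rest
          simp only [Function.comp_apply, List.zip_cons_cons, pvFilterLoop_cons_none]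
        rw [this, ih fs]
      | some v =>
        have hstep : ∀ x, ((pvProduct (ns.map (fun y => PySem.List.pyRange 0 y 1))).map
              (fun rest => x :: rest)).filter (fun idx => pvFilterLoop (idx.zip (some v :: fs)))
            = if x = v then (pvProduct (pvAxes ns fs)).map (fun rest => v :: rest) else [] := by
          intro x
          rw [List.filter_map]
          by_cases hx : x = v
          · have : (fun idx => pvFilterLoop (idx.zip (some v :: fs))) ∘ (fun rest => x :: rest)
                = fun rest => pvFilterLoop (rest.zip fs) := by
              funext rest
              simp only [Function.comp_apply, List.zip_cons_cons, pvFilterLoop_cons_some, hx]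
              simp
            rw [this, ih fs, if_pos hx, hx]
          · have : (fun idx => pvFilterLoop (idx.zip (some v :: fs))) ∘ (fun rest => x :: rest)
                = fun _ => false := by
              funext rest
              simp only [Function.comp_apply, List.zip_cons_cons, pvFilterLoop_cons_some]
              simp [hx]
            rw [this, List.filter_false]
            simp [hx]
        calc (PySem.List.pyRange 0 n 1).flatMap (fun x =>
                ((pvProduct (ns.map (fun y => PySem.List.pyRange 0 y 1))).map
                  (fun rest => x :: rest)).filter (fun idx => pvFilterLoop (idx.zip (some v :: fs))))
            = (PySem.List.pyRange 0 n 1).flatMap (fun x =>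
                if x = v then (pvProduct (pvAxes ns fs)).map (fun rest => v :: rest) else []) := by
              exact List.flatMap_congr (fun x _ => hstep x)
          _ = pvProduct (pvAxes (n :: ns) (some v :: fs)) := by
              rw [flatMap_single (PySem.List.nodup_pyRange_one 0 n) v _
                (fun x _ hx => by simp [hx])]
              by_cases hv : 0 ≤ v ∧ v < n
              · simp [pvAxes, pvAxis, pvProduct, PySem.List.mem_pyRange_one, hv]
              · simp only [pvAxes, pvAxis, PySem.List.mem_pyRange_one, if_neg hv]
                simp [pvProduct]

-- ===== VERDICT (by name: the statement is the Claim_ definition above) =====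
theorem filtered_range_index_spec : Claim_equal_filtered_range_index := by
  intro shape filter _
  unfold Spec_filtered_range_index filtered_range_index filtered_range_index_alt range_index_port
  exact pv_main shape filter
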